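-- pv_equiv track=rewrite | github.com/vgslavov/Problems | leetcode/backspace_compare.py | skip_pattern
-- ===== SOURCE A (Python) =====
-- from typing import Iterator
--
-- def skip_pattern(s: str, pattern: str) -> Iterator[str]:
--     skip = 0
--
--     for c in reversed(s):
--         if c == pattern:
--             skip += 1
--         elif skip:
--             skip -= 1
--         else:
--             yield c
-- ===== SOURCE B (Python) =====
-- def skip_pattern(s: str, pattern: str):
--     stack = []
--     for c in s:
--         if c == pattern:
--             if stack:
--                 stack.pop()
--         else:
--             stack.append(c)
--     yield from reversed(stack)
-- ===== Notes on version B (the rewrite author's own statement) =====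
-- stated objective: alternative
-- what changed: B traverses the string forward maintaining an explicit stack of surviving characters (pop on a backspace match) and yields the reversed stack, instead of A's reverse traversal with a skip counter.
import Mathlib
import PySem

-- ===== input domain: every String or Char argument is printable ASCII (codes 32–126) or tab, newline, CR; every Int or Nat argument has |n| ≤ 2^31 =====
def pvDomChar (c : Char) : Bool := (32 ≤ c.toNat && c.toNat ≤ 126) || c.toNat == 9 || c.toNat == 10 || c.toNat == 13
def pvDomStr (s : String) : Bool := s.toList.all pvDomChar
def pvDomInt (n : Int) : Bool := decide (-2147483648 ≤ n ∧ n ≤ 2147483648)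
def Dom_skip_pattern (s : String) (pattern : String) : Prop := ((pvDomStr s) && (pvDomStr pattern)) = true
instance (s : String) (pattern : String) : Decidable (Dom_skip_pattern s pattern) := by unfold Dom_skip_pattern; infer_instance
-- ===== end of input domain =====

-- B replaces A's reverse traversal with a skip counter by a forward traversal with an
-- explicit stack of survivors, emitted in reverse (objective: alternative).


-- ===== PORT A =====
-- A iterates over reversed(s) keeping a skip counter; each yielded char becomes a String.
def skipGo (pattern : String) : List Char → Nat → List String
  | [], _ => []
  | c :: rest, k =>
    if String.mk [c] = pattern then skipGo pattern rest (k + 1)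
    else if k ≠ 0 then skipGo pattern rest (k - 1)
    else String.mk [c] :: skipGo pattern rest 0

def skip_pattern (s : String) (pattern : String) : List String :=
  skipGo pattern s.toList.reverse 0

-- ===== PORT B =====
-- B's loop body: pop the last element on a backspace match (no-op on empty), else append.
def stackStep (pattern : String) (st : List String) (c : Char) : List String :=
  if String.mk [c] = pattern then st.dropLast else st ++ [String.mk [c]]

def skip_pattern_alt (s : String) (pattern : String) : List String :=
  (s.toList.foldl (stackStep pattern) []).reverse

-- ===== PRECONDITION & SPEC =====
def Spec_skip_pattern (s : String) (pattern : String) (out : List String) : Prop := out = skip_pattern_alt s pattern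
instance (s : String) (pattern : String) (out : List String) : Decidable (Spec_skip_pattern s pattern out) := by unfold Spec_skip_pattern; infer_instance

-- ===== CLAIM (what is proved, stated in full; the proofs are below) =====
def Claim_equal_skip_pattern : Prop := ∀ (s : String) (pattern : String), Dom_skip_pattern s pattern → Spec_skip_pattern s pattern (skip_pattern s pattern)

-- ===== LEMMAS AND PROOFS =====

-- head-at-top formulation of B's stack, used only by the proof
def hstep (pattern : String) (st : List String) (c : Char) : List String :=
  if String.mk [c] = pattern then st.tail else String.mk [c] :: st

theorem foldl_stackStep_reverse (pattern : String) :
    ∀ (l : List Char) (st : List String),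
      l.foldl (stackStep pattern) st.reverse = (l.foldl (hstep pattern) st).reverse := by
  intro l
  induction l with
  | nil => intro st; simp
  | cons c l ih =>
    intro st
    have h : stackStep pattern st.reverse c = (hstep pattern st c).reverse := by
      unfold stackStep hstep
      split_ifs with h
      · cases st <;> simp
      · simp
    simp only [List.foldl_cons, h, ih]

theorem drop_succ_tail {α : Type} (l : List α) (n : Nat) :
    l.drop (n + 1) = l.tail.drop n := by
  cases l <;> simp

theorem skipGo_eq_drop (pattern : String) :
    ∀ (m : List Char) (k : Nat),
      skipGo pattern m k = (m.reverse.foldl (hstep pattern) []).drop k := by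
  intro m
  induction m with
  | nil => intro k; simp [skipGo]
  | cons c m ih =>
    intro k
    have hfold : (c :: m).reverse.foldl (hstep pattern) [] =
        hstep pattern (m.reverse.foldl (hstep pattern) []) c := by
      simp [List.foldl_append]
    unfold skipGo
    split_ifs with h1 h2
    · rw [ih, hfold, hstep, if_pos h1, ← drop_succ_tail]
    · obtain ⟨j, rfl⟩ : ∃ j, k = j + 1 := ⟨k - 1, (Nat.succ_pred_eq_of_pos (Nat.pos_of_ne_zero h2)).symm⟩
      rw [ih, hfold, hstep, if_neg h1]
      simp [drop_succ_tail]
    · simp only [ne_eq, Decidable.not_not] at h2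
      subst h2
      rw [ih, hfold, hstep, if_neg h1]
      simp

-- ===== VERDICT (by name: the statement is the Claim_ definition above) =====
theorem skip_pattern_spec : Claim_equal_skip_pattern := by
  intro s pattern _
  unfold Spec_skip_pattern skip_pattern skip_pattern_alt
  rw [skipGo_eq_drop, List.reverse_reverse]
  have := foldl_stackStep_reverse pattern s.toList []
  simp only [List.reverse_nil] at this
  rw [this, List.reverse_reverse, List.drop_zero]
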